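-- pv_equiv track=rewrite | github.com/jeffpace1974/ShoulderSerf | simple_captions_search.py | _detect_high_confidence_episodes
-- ===== SOURCE A (Python) =====
-- from typing import List, Dict, Tuple, Optional, Set
--
-- def _detect_high_confidence_episodes(results: List[Tuple], query: str) -> List[Tuple]:
--     """Detect and prioritize episodes that are high-confidence matches for narrative queries"""
--     if not results:
--         return results
--
--     query_lower = query.lower()
--     high_confidence = []
--     other_results = []
--
--     # Define high-confidence patterns
--     confidence_patterns = {
--         'ep169': ['family', 'ireland', 'worried', 'house', 'depression', 'birthday', 'mrs moore'],
--         'ep35': ['fire', 'reading', 'malory', 'drowsy', 'night', 'mood', 'puts himself'],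
--         'ep200': ['arthur', 'critiques', 'writing', 'greeves', 'story', 'attempt']
--     }
--
--     for result in results:
--         title, video_id, start_time, text = result
--         title_lower = title.lower()
--         text_lower = text.lower()
--
--         is_high_confidence = False
--
--         # Check if this episode matches a known pattern with high confidence
--         for episode, pattern_terms in confidence_patterns.items():
--             if episode in title_lower:
--                 # Count how many pattern terms appear in both query and text
--                 query_matches = sum(1 for term in pattern_terms if term in query_lower)
--                 text_matches = sum(1 for term in pattern_terms if term in text_lower)
--
--                 # High confidence if query has 2+ pattern terms and text has 1+ matches
--                 if query_matches >= 2 and text_matches >= 1: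
--                     high_confidence.append(result)
--                     is_high_confidence = True
--                     break
--
--         if not is_high_confidence:
--             other_results.append(result)
--
--     # Return high-confidence episodes first, then others
--     return high_confidence + other_results
-- ===== SOURCE B (Python) =====
-- from typing import List, Tuple
--
-- def _detect_high_confidence_episodes(results: List[Tuple], query: str) -> List[Tuple]:
--     """Counting-sort placement: flag each result once, then write each result
--     directly into its final slot of a preallocated output list."""
--     confidence_patterns = {
--         'ep169': ['family', 'ireland', 'worried', 'house', 'depression', 'birthday', 'mrs moore'],
--         'ep35': ['fire', 'reading', 'malory', 'drowsy', 'night', 'mood', 'puts himself'],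
--         'ep200': ['arthur', 'critiques', 'writing', 'greeves', 'story', 'attempt']
--     }
--     query_lower = query.lower()
--     # Episodes whose pattern has >= 2 terms in the query (query is fixed, so compute once).
--     eligible = [(ep, terms) for ep, terms in confidence_patterns.items()
--                 if sum(term in query_lower for term in terms) >= 2]
--     # One flag per result: is it a high-confidence match?
--     flags = [any(ep in r[0].lower() and any(term in r[3].lower() for term in terms)
--                  for ep, terms in eligible)
--              for r in results]
--     # Counting-sort placement: highs occupy slots 0..k-1, others k..n-1, order preserved.
--     out = [None] * len(results)
--     h, o = 0, sum(flags)
--     for r, f in zip(results, flags):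
--         if f:
--             out[h] = r
--             h += 1
--         else:
--             out[o] = r
--             o += 1
--     return out
-- ===== Notes on version B (the rewrite author's own statement) =====
-- stated objective: alternative
-- what changed: Replaced A's two-accumulator partition (append to high/other lists inside a nested episode loop that re-scans the query per result, then concatenate) by: precompute query-eligible episodes once, compute one boolean flag per result, and place each result directly into its final index of a preallocated output list via counting-sort style position counters (highs at 0..k-1, others at k..n-1).
import Mathlib
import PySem

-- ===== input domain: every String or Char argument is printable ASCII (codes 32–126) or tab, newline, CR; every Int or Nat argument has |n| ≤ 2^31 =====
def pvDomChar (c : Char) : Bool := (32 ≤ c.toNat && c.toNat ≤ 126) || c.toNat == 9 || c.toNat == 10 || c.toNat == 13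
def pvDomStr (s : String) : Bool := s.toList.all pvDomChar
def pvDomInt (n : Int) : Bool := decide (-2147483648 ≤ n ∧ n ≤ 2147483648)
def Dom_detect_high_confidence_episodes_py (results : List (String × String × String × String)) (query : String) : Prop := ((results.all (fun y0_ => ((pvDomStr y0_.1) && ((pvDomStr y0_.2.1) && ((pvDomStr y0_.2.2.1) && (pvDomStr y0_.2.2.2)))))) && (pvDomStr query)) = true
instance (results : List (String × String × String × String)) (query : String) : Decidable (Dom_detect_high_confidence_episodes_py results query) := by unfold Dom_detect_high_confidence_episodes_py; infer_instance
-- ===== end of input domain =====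

-- B replaces A's two-accumulator partition (with its per-result re-scan of the query) by a
-- flags pass plus counting-sort placement of every result into its final slot of a
-- preallocated output list (objective: a genuinely different construction, same cost).

-- the confidence_patterns dict literal, common to both sources (distinct keys; items() order = literal order)
def pvPatterns : List (String × List String) :=
  [("ep169", ["family", "ireland", "worried", "house", "depression", "birthday", "mrs moore"]),
   ("ep35",  ["fire", "reading", "malory", "drowsy", "night", "mood", "puts himself"]),
   ("ep200", ["arthur", "critiques", "writing", "greeves", "story", "attempt"])]

-- ===== PORT A =====
-- the inner `for episode, pattern_terms in confidence_patterns.items(): … break` loop of A: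
-- returns whether some episode matched with high confidence (the `break` = returning true)
def pvScanA (ql tl xl : String) : List (String × List String) → Bool
  | [] => false
  | (ep, terms) :: rest =>
    if PySem.Str.isIn ep tl then
      if ((terms.map (fun t => if PySem.Str.isIn t ql then (1 : Int) else 0)).sum ≥ 2)
          ∧ ((terms.map (fun t => if PySem.Str.isIn t xl then (1 : Int) else 0)).sum ≥ 1) then
        true
      else pvScanA ql tl xl rest
    else pvScanA ql tl xl rest

def detect_high_confidence_episodes_py (results : List (String × String × String × String)) (query : String) : List (String × String × String × String) :=
  if results = [] then results
  else
    let ql := PySem.Str.lower query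
    let acc := results.foldl
      (fun (acc : List (String × String × String × String) × List (String × String × String × String)) r =>
        if pvScanA ql (PySem.Str.lower r.1) (PySem.Str.lower r.2.2.2) pvPatterns then
          (acc.1 ++ [r], acc.2)
        else
          (acc.1, acc.2 ++ [r]))
      ([], [])
    acc.1 ++ acc.2

-- ===== PORT B =====
-- eligible = episodes whose pattern has ≥ 2 terms occurring in the lowered query
def pvEligible (ql : String) : List (String × List String) :=
  pvPatterns.filter (fun p => decide ((p.2.map (fun t => if PySem.Str.isIn t ql then (1 : Int) else 0)).sum ≥ 2))

def pvIsHigh (eligible : List (String × List String)) (r : String × String × String × String) : Bool :=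
  eligible.any (fun p =>
    PySem.Str.isIn p.1 (PySem.Str.lower r.1) && p.2.any (fun t => PySem.Str.isIn t (PySem.Str.lower r.2.2.2)))

-- Source B: out = [None]*n; write each result at its final index (h counts highs, o starts at
-- sum(flags) = number of True flags); the final `return out` holds no None, so extracting the
-- filled slots with reduceOption returns exactly that list.
def detect_high_confidence_episodes_py_alt (results : List (String × String × String × String)) (query : String) : List (String × String × String × String) :=
  let eligible := pvEligible (PySem.Str.lower query)
  let flags := results.map (pvIsHigh eligible)
  let st := (results.zip flags).foldl
    (fun (st : List (Option (String × String × String × String)) × Nat × Nat) rf =>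
      if rf.2 then (st.1.set st.2.1 (some rf.1), st.2.1 + 1, st.2.2)
      else (st.1.set st.2.2 (some rf.1), st.2.1, st.2.2 + 1))
    (List.replicate results.length none, 0, flags.count true)
  st.1.reduceOption

-- ===== PRECONDITION & SPEC =====
def Spec_detect_high_confidence_episodes_py (results : List (String × String × String × String)) (query : String) (out : List (String × String × String × String)) : Prop := out = detect_high_confidence_episodes_py_alt results query
instance (results : List (String × String × String × String)) (query : String) (out : List (String × String × String × String)) : Decidable (Spec_detect_high_confidence_episodes_py results query out) := by unfold Spec_detect_high_confidence_episodes_py; infer_instance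

-- ===== CLAIM (what is proved, stated in full; the proofs are below) =====
def Claim_equal_detect_high_confidence_episodes_py : Prop := ∀ (results : List (String × String × String × String)) (query : String), Dom_detect_high_confidence_episodes_py results query → Spec_detect_high_confidence_episodes_py results query (detect_high_confidence_episodes_py results query)

-- ===== LEMMAS AND PROOFS =====

-- the two-accumulator partition fold of A, closed form
theorem pv_foldl_partition {α : Type} (p : α → Bool) :
    ∀ (xs : List α) (H O : List α),
    xs.foldl (fun acc r => if p r then (acc.1 ++ [r], acc.2) else (acc.1, acc.2 ++ [r])) (H, O)
      = (H ++ xs.filter p, O ++ xs.filter (fun r => !p r)) := by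
  intro xs
  induction xs with
  | nil => intro H O; simp
  | cons x xs ih =>
    intro H O
    by_cases hx : p x = true
    · simp only [List.foldl_cons]
      rw [if_pos hx, ih (H ++ [x]) O]
      simp [hx]
    · have hx' : p x = false := by cases h : p x <;> simp_all
      simp only [List.foldl_cons, hx']
      rw [if_neg (by simp [hx'])]
      rw [ih H (O ++ [x])]
      simp [hx']

theorem pv_sum_ite_nonneg (q : String → Bool) (terms : List String) :
    0 ≤ (terms.map (fun t => if q t then (1 : Int) else 0)).sum := by
  induction terms with
  | nil => simp
  | cons t ts ih => by_cases h : q t <;> simp [h] <;> omega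

theorem pv_sum_ge_one_iff (q : String → Bool) (terms : List String) :
    ((terms.map (fun t => if q t then (1 : Int) else 0)).sum ≥ 1) ↔ terms.any q = true := by
  induction terms with
  | nil => simp
  | cons t ts ih =>
    by_cases h : q t
    · have := pv_sum_ite_nonneg q ts
      simp [h]; omega
    · simp [h, ih]

-- A's inner episode scan = B's "any eligible episode found in title with a text hit"
theorem pv_scan_eq_any (ql tl xl : String) :
    ∀ pats : List (String × List String),
    pvScanA ql tl xl pats
      = (pats.filter (fun p => decide ((p.2.map (fun t => if PySem.Str.isIn t ql then (1 : Int) else 0)).sum ≥ 2))).any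
          (fun p => PySem.Str.isIn p.1 tl && p.2.any (fun t => PySem.Str.isIn t xl)) := by
  intro pats
  induction pats with
  | nil => rfl
  | cons hd rest ih =>
    obtain ⟨ep, terms⟩ := hd
    simp only [pvScanA, List.filter_cons]
    by_cases ht : PySem.Str.isIn ep tl = true
    · rw [if_pos ht]
      by_cases hq : ((terms.map (fun t => if PySem.Str.isIn t ql then (1 : Int) else 0)).sum ≥ 2)
      · by_cases hx : ((terms.map (fun t => if PySem.Str.isIn t xl then (1 : Int) else 0)).sum ≥ 1)
        · have hany : terms.any (fun t => PySem.Str.isIn t xl) = true :=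
            (pv_sum_ge_one_iff _ terms).mp hx
          rw [if_pos ⟨hq, hx⟩, if_pos (by simpa using hq), List.any_cons]
          simp only [ht, hany, Bool.and_self, Bool.true_or]
        · have hany : terms.any (fun t => PySem.Str.isIn t xl) = false := by
            cases h : terms.any (fun t => PySem.Str.isIn t xl)
            · rfl
            · exact absurd ((pv_sum_ge_one_iff _ terms).mpr h) hx
          rw [if_neg (fun h => hx h.2), if_pos (by simpa using hq), List.any_cons]
          simp only [hany, Bool.and_false, Bool.false_or]
          exact ih
      · rw [if_neg (fun h => hq h.1), if_neg (by simpa using hq)]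
        exact ih
    · rw [if_neg ht]
      have ht' : PySem.Str.isIn ep tl = false := by
        cases h : PySem.Str.isIn ep tl
        · rfl
        · exact absurd h ht
      by_cases hq : ((terms.map (fun t => if PySem.Str.isIn t ql then (1 : Int) else 0)).sum ≥ 2)
      · rw [if_pos (by simpa using hq), List.any_cons]
        simp only [ht', Bool.false_and, Bool.false_or]
        exact ih
      · rw [if_neg (by simpa using hq)]
        exact ih

-- set at the exact boundary of a prefix
theorem pv_set_at {α : Type} : ∀ (L : List α) (rest : List α) (x y : α),
    (L ++ y :: rest).set L.length x = L ++ x :: rest := by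
  intro L
  induction L with
  | nil => intro rest x y; rfl
  | cons a as ih => intro rest x y; simp [List.set, ih]

-- zipping a list with its own map of a predicate
theorem pv_zip_map_self {α : Type} (p : α → Bool) : ∀ xs : List α,
    xs.zip (xs.map p) = xs.map (fun x => (x, p x)) := by
  intro xs
  induction xs with
  | nil => rfl
  | cons x xs ih => simp [List.zip_cons_cons, ih]

theorem pv_count_map_true {α : Type} (p : α → Bool) : ∀ xs : List α,
    (xs.map p).count true = xs.countP p := by
  intro xs
  induction xs with
  | nil => rfl
  | cons x xs ih =>
    by_cases h : p x <;> simp [List.count_cons, List.countP_cons, h, ih]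

-- the counting-sort placement fold: highs land after A, others after B, each in order
theorem pv_fill {α : Type} (p : α → Bool) :
    ∀ (xs A B : List α),
    ((xs.map (fun x => (x, p x))).foldl
      (fun (st : List (Option α) × Nat × Nat) rf =>
        if rf.2 then (st.1.set st.2.1 (some rf.1), st.2.1 + 1, st.2.2)
        else (st.1.set st.2.2 (some rf.1), st.2.1, st.2.2 + 1))
      (A.map some ++ List.replicate (xs.countP p) none ++ B.map some
         ++ List.replicate (xs.countP (fun x => !p x)) none,
       A.length, A.length + xs.countP p + B.length)).1
      = (A ++ xs.filter p).map some ++ (B ++ xs.filter (fun x => !p x)).map some := by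
  intro xs
  induction xs with
  | nil => intro A B; simp
  | cons x xs ih =>
    intro A B
    by_cases hx : p x = true
    · have hc : (x :: xs).countP p = xs.countP p + 1 := by simp [List.countP_cons, hx]
      have hc' : (x :: xs).countP (fun y => !p y) = xs.countP (fun y => !p y) := by
        simp [List.countP_cons, hx]
      have hset : (A.map some ++ List.replicate (xs.countP p + 1) none ++ B.map some
            ++ List.replicate (xs.countP (fun y => !p y)) none).set A.length (some x)
          = (A ++ [x]).map some ++ List.replicate (xs.countP p) none ++ B.map some
            ++ List.replicate (xs.countP (fun y => !p y)) none := by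
        have h1 := pv_set_at (A.map some)
          (List.replicate (xs.countP p) none ++ B.map some
            ++ List.replicate (xs.countP (fun y => !p y)) none) (some x) (none)
        simp only [List.replicate_succ, List.append_assoc, List.cons_append] at *
        simpa [List.length_map] using h1
      have harith : A.length + (xs.countP p + 1) + B.length
          = (A ++ [x]).length + xs.countP p + B.length := by
        simp only [List.length_append, List.length_cons, List.length_nil]
        omega
      simp only [List.map_cons, List.foldl_cons, hx, if_true, hc, hc']
      rw [hset, harith, show A.length + 1 = (A ++ [x]).length by simp, ih (A ++ [x]) B]
      simp [hx, List.filter_cons]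
    · have hx' : p x = false := by cases h : p x <;> simp_all
      have hc : (x :: xs).countP p = xs.countP p := by simp [List.countP_cons, hx']
      have hc' : (x :: xs).countP (fun y => !p y) = xs.countP (fun y => !p y) + 1 := by
        simp [List.countP_cons, hx']
      have hset : (A.map some ++ List.replicate (xs.countP p) none ++ B.map some
            ++ List.replicate (xs.countP (fun y => !p y) + 1) none).set
            (A.length + xs.countP p + B.length) (some x)
          = A.map some ++ List.replicate (xs.countP p) none ++ (B ++ [x]).map some
            ++ List.replicate (xs.countP (fun y => !p y)) none := by
        have h1 := pv_set_at (A.map some ++ List.replicate (xs.countP p) (none : Option α) ++ B.map some)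
          (List.replicate (xs.countP (fun y => !p y)) none) (some x) (none)
        have hidx : A.length + xs.countP p + B.length
            = (A.map some ++ List.replicate (xs.countP p) (none : Option α) ++ B.map some).length := by
          simp
          omega
        rw [hidx]
        simp only [List.replicate_succ, List.append_assoc, List.cons_append] at *
        simpa [List.append_assoc] using h1
      have harith : A.length + xs.countP p + B.length + 1
          = A.length + xs.countP p + (B ++ [x]).length := by
        simp only [List.length_append, List.length_cons, List.length_nil]
        omega
      simp only [List.map_cons, List.foldl_cons, hx', Bool.false_eq_true, if_false, hc, hc']
      rw [hset, harith, ih A (B ++ [x])]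
      simp [hx', List.filter_cons]

theorem pv_reduceOption_map_some {α : Type} : ∀ l : List α, (l.map some).reduceOption = l := by
  intro l
  induction l with
  | nil => rfl
  | cons x xs ih => simp [List.reduceOption_cons_of_some, ih]

-- every element is counted either by p or by !p
theorem pv_countP_split {α : Type} (p : α → Bool) : ∀ xs : List α,
    xs.length = xs.countP p + xs.countP (fun x => !p x) := by
  intro xs
  induction xs with
  | nil => rfl
  | cons x xs ih =>
    by_cases h : p x <;> simp [List.countP_cons, h, ih] <;> omega

-- ===== VERDICT (by name: the statement is the Claim_ definition above) =====
theorem detect_high_confidence_episodes_py_spec : Claim_equal_detect_high_confidence_episodes_py := by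
  intro results query _
  unfold Spec_detect_high_confidence_episodes_py
  unfold detect_high_confidence_episodes_py detect_high_confidence_episodes_py_alt
  set ql := PySem.Str.lower query with hql
  set q : (String × String × String × String) → Bool := pvIsHigh (pvEligible ql) with hq
  have hpoint : ∀ r : String × String × String × String,
      pvScanA ql (PySem.Str.lower r.1) (PySem.Str.lower r.2.2.2) pvPatterns = q r := by
    intro r
    rw [pv_scan_eq_any]
    simp [hq, pvIsHigh, pvEligible]
  have hfill := pv_fill q results [] []
  simp only [List.map_nil, List.nil_append, List.append_nil, List.length_nil,
    Nat.zero_add, Nat.add_zero] at hfill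
  have hB : (results.zip (results.map q)).foldl
      (fun (st : List (Option (String × String × String × String)) × Nat × Nat) rf =>
        if rf.2 then (st.1.set st.2.1 (some rf.1), st.2.1 + 1, st.2.2)
        else (st.1.set st.2.2 (some rf.1), st.2.1, st.2.2 + 1))
      (List.replicate results.length none, 0, (results.map q).count true)
      |>.1.reduceOption
      = results.filter q ++ results.filter (fun r => !q r) := by
    rw [pv_zip_map_self, pv_count_map_true, pv_countP_split q results, List.replicate_add, hfill]
    simp [List.reduceOption_append, pv_reduceOption_map_some]
  by_cases hres : results = []
  · subst hres; simp
  · simp only [if_neg hres]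
    rw [pv_foldl_partition (fun r => pvScanA ql (PySem.Str.lower r.1) (PySem.Str.lower r.2.2.2) pvPatterns) results [] []]
    rw [hB]
    simp only [List.nil_append]
    congr 1
    · exact List.filter_congr (fun r _ => by rw [hpoint r])
    · exact List.filter_congr (fun r _ => by rw [hpoint r])
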